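-- pv_equiv track=rewrite | github.com/HS-YN/swpp17f-plask | PlaskBack/location/models.py | servParse
-- ===== SOURCE A (Python) =====
-- def servParse(instr) :
-- 	instr = instr.replace(' ', '<!?>')
-- 	instr = instr.replace(';', ' ')
-- 	tokens = instr.split()
-- 	result = []
-- 	for tok in tokens :
-- 		tok = str(tok).replace('<!?>', ' ')
-- 		result.append(tok)
-- 	return result
-- ===== SOURCE B (Python) =====
-- def servParse(instr):
--     # single-pass scanner: split on ';' and non-space whitespace, keep spaces inside tokens
--     result = []
--     buf = ''
--     for c in instr:
--         if c == ';' or (c.isspace() and c != ' '):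
--             if buf:
--                 result.append(buf)
--             buf = ''
--         else:
--             buf += c
--     if buf:
--         result.append(buf)
--     return result
-- ===== Notes on version B (the rewrite author's own statement) =====
-- stated objective: simpler
-- what changed: Replaced the sentinel trick (replace spaces with '<!?>', replace ';' with space, whitespace-split, replace the sentinel back) by a direct single-pass character scanner that splits on ';' and non-space whitespace while keeping spaces inside tokens.
-- intended difference: On inputs containing the literal substring '<!?>', A's sentinel leaks: A returns tokens with each literal '<!?>' collapsed to a single space, while B returns the characters verbatim, which is the intended behaviour since '<!?>' is only an internal marker of A. — e.g. on servParse("a<!?>b"): A returns ["a b"], B returns ["a<!?>b"]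
import Mathlib
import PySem

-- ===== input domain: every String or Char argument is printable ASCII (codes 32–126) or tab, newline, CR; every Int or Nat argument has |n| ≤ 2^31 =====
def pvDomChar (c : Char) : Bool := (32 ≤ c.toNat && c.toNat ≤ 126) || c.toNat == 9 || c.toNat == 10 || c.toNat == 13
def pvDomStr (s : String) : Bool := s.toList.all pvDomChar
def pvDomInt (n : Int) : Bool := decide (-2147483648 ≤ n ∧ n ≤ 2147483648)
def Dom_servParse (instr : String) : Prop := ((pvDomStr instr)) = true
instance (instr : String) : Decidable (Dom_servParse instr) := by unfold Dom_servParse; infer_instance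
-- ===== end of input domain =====

-- B replaces A's sentinel-substitution trick by a direct single-pass character scanner (same cost, plainer);
-- on inputs containing A's literal sentinel '<!?>' the two differ (see D_servParse below).

-- ===== PORT A =====
def servParse (instr : String) : List String :=
  let instr1 := PySem.Str.replace instr " " "<!?>"
  let instr2 := PySem.Str.replace instr1 ";" " "
  let tokens := PySem.Str.split₀ instr2
  tokens.foldl (fun result tok => result ++ [PySem.Str.replace tok "<!?>" " "]) []

-- ===== PORT B =====
-- separator test of Source B: c == ';' or (c.isspace() and c != ' ')
def sepB (c : Char) : Bool := c == ';' || (PySem.Chars.isspace c && !(c == ' '))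

def servParse_alt (instr : String) : List String :=
  let fin := instr.toList.foldl
    (fun (st : List String × List Char) c =>
      if sepB c then
        (if st.2 = [] then st.1 else st.1 ++ [String.ofList st.2], [])
      else (st.1, st.2 ++ [c]))
    ([], [])
  if fin.2 = [] then fin.1 else fin.1 ++ [String.ofList fin.2]

-- ===== PRECONDITION & SPEC =====
-- On inputs containing the literal substring "<!?>" (A's internal sentinel), A collapses each such
-- occurrence to a single space inside its token, while B keeps the characters verbatim, which is the
-- intended behaviour since "<!?>" is only an internal marker of A's implementation.
def D_servParse (instr : String) : Prop := PySem.Str.isIn "<!?>" instr = true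
instance (instr : String) : Decidable (D_servParse instr) := by unfold D_servParse; infer_instance

def Spec_servParse (instr : String) (out : List String) : Prop := ¬ D_servParse instr → out = servParse_alt instr
instance (instr : String) (out : List String) : Decidable (Spec_servParse instr out) := by unfold Spec_servParse; infer_instance

def pvDiffWitness_servParse : String := "a<!?>b"
def pvDiffWitnessOut_servParse : (List String) × (List String) := (["a b"], ["a<!?>b"])

-- ===== CLAIM (what is proved, stated in full; the proofs are below) =====
def Claim_unchanged_servParse : Prop := ∀ (instr : String), Dom_servParse instr → Spec_servParse instr (servParse instr)
def Claim_changed_servParse : Prop := Dom_servParse (pvDiffWitness_servParse) ∧ D_servParse (pvDiffWitness_servParse) ∧ servParse (pvDiffWitness_servParse) = pvDiffWitnessOut_servParse.1 ∧ servParse_alt (pvDiffWitness_servParse) = pvDiffWitnessOut_servParse.2 ∧ pvDiffWitnessOut_servParse.1 ≠ pvDiffWitnessOut_servParse.2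

-- ===== LEMMAS AND PROOFS =====

-- A's sentinel and the character-level encodings A's replace pipeline performs
def sentL : List Char := ['<', '!', '?', '>']
def encC (c : Char) : List Char := if c = ' ' then sentL else [c]
def gC (c : Char) : List Char := if c = ' ' then sentL else if c = ';' then [' '] else [c]

-- the common tokenisation both sides compute: split on p, empty tokens dropped
def tokP (p : Char → Bool) : List Char → List Char → List (List Char)
  | [], buf => if buf = [] then [] else [buf]
  | c :: t, buf => if p c then (if buf = [] then tokP p t [] else buf :: tokP p t []) else tokP p t (buf ++ [c])

-- proof-side names for B's fold step and final flush (definitionally equal to the port's lambdas)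
def flushPart (st : List String × List Char) : List String :=
  if st.2 = [] then st.1 else st.1 ++ [String.ofList st.2]
def stepB (st : List String × List Char) (c : Char) : List String × List Char :=
  if sepB c then (flushPart st, []) else (st.1, st.2 ++ [c])

-- single-character replace is a flatMap
theorem replace_go_single (a : Char) (new : List Char) :
    ∀ (fuel : Nat) (l acc : List Char), l.length ≤ fuel →
      PySem.Chars.replace.go [a] new fuel l acc
        = acc.reverse ++ l.flatMap (fun c => if c = a then new else [c]) := by
  intro fuel
  induction fuel with
  | zero => intro l acc h; cases l <;> simp_all [PySem.Chars.replace.go]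
  | succ f ih =>
    intro l acc h
    cases l with
    | nil => simp [PySem.Chars.replace.go]
    | cons c t =>
      by_cases hc : c = a
      · rw [show PySem.Chars.replace.go [a] new (f+1) (c::t) acc
              = PySem.Chars.replace.go [a] new f (List.drop 1 (c::t)) (new.reverse ++ acc) by
            simp [PySem.Chars.replace.go, List.isPrefixOf, hc]]
        simp [ih t _ (by simpa using h), hc]
      · have hac : ¬ a = c := fun h' => hc h'.symm
        rw [show PySem.Chars.replace.go [a] new (f+1) (c::t) acc
              = PySem.Chars.replace.go [a] new f t (c :: acc) by
            simp [PySem.Chars.replace.go, List.isPrefixOf, hac]]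
        simp [ih t _ (by simpa using h), hc]

theorem replace_single (cs : List Char) (a : Char) (new : List Char) :
    PySem.Chars.replace cs [a] new = cs.flatMap (fun c => if c = a then new else [c]) := by
  simp [PySem.Chars.replace, replace_go_single a new cs.length cs [] le_rfl]

-- A's two replaces compose into the single per-character encoding gC
theorem pipeline_eq (cs : List Char) :
    PySem.Chars.replace (PySem.Chars.replace cs [' '] sentL) [';'] [' '] = cs.flatMap gC := by
  rw [replace_single, replace_single, List.flatMap_assoc]
  apply List.flatMap_congr
  intro c _
  by_cases h1 : c = ' '
  · subst h1; simp [sentL, gC]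
  · by_cases h2 : c = ';' <;> simp [h1, h2, gC]

theorem enc_eq_nil_iff (buf : List Char) : buf.flatMap encC = [] ↔ buf = [] := by
  cases buf with
  | nil => simp
  | cons c t =>
    simp only [List.flatMap_cons]
    constructor
    · intro h
      have : encC c = [] := by
        cases hh : encC c with
        | nil => rfl
        | cons x y => rw [hh] at h; simp at h
      unfold encC at this; split at this <;> simp_all [sentL]
    · intro h; simp at h

-- enc r = c :: u with c a non-space, non-'<' character forces r = c :: r'
theorem enc_cons_inv (c : Char) (hc2 : c ≠ '<') :
    ∀ (r u : List Char), r.flatMap encC = c :: u → ∃ r', r = c :: r' ∧ u = r'.flatMap encC := by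
  intro r u h
  cases r with
  | nil => simp at h
  | cons r0 r' =>
    by_cases h0 : r0 = ' '
    · subst h0
      simp [encC, sentL] at h
      exact absurd h.1.symm hc2
    · simp [encC, h0] at h
      exact ⟨r', by simp [h.1, h.2]⟩

-- decoding the encoding of a sentinel-free run gives the run back
theorem dec_enc_go (run : List Char) (hfree : ¬ sentL <:+: run) :
    ∀ (fuel : Nat) (acc : List Char), (run.flatMap encC).length ≤ fuel →
      PySem.Chars.replace.go sentL [' '] fuel (run.flatMap encC) acc = acc.reverse ++ run := by
  induction run with
  | nil => intro fuel acc h; cases fuel <;> simp [PySem.Chars.replace.go]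
  | cons c t ih =>
    intro fuel acc h
    have hfree' : ¬ sentL <:+: t := fun hi => hfree (hi.trans (List.suffix_cons c t).isInfix)
    by_cases hc : c = ' '
    · subst hc
      have hrw : (' ' :: t).flatMap encC = '<' :: '!' :: '?' :: '>' :: t.flatMap encC := by
        simp [encC, sentL]
      cases fuel with
      | zero => rw [hrw] at h; simp at h
      | succ f =>
        rw [hrw] at h ⊢
        rw [show PySem.Chars.replace.go sentL [' '] (f+1) ('<' :: '!' :: '?' :: '>' :: t.flatMap encC) acc
              = PySem.Chars.replace.go sentL [' '] f (t.flatMap encC) (' ' :: acc) by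
            simp [PySem.Chars.replace.go, sentL, List.isPrefixOf]]
        rw [ih hfree' f (' ' :: acc) (by simp at h ⊢; omega)]
        simp
    · have hrw : (c :: t).flatMap encC = c :: t.flatMap encC := by simp [encC, hc]
      cases fuel with
      | zero => rw [hrw] at h; simp at h
      | succ f =>
        rw [hrw] at h ⊢
        have hnp : sentL.isPrefixOf (c :: t.flatMap encC) = false := by
          by_contra hx
          have hx' : sentL.isPrefixOf (c :: t.flatMap encC) = true := by simpa using hx
          have hp : sentL <+: c :: t.flatMap encC := List.isPrefixOf_iff_prefix.mp hx'
          obtain ⟨rest, hrest⟩ := hp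
          simp only [sentL, List.cons_append] at hrest
          obtain ⟨hcq, hT⟩ := List.cons.injEq .. ▸ hrest
          obtain ⟨t1, ht1, hu1⟩ := enc_cons_inv '!' (by decide) t _ hT.symm
          obtain ⟨t2, ht2, hu2⟩ := enc_cons_inv '?' (by decide) t1 _ hu1.symm
          obtain ⟨t3, ht3, _⟩ := enc_cons_inv '>' (by decide) t2 _ hu2.symm
          exact hfree (List.IsPrefix.isInfix ⟨t3, by simp [sentL, ← hcq, ht1, ht2, ht3]⟩)
        rw [show PySem.Chars.replace.go sentL [' '] (f+1) (c :: t.flatMap encC) acc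
              = PySem.Chars.replace.go sentL [' '] f (t.flatMap encC) (c :: acc) by
            simp [PySem.Chars.replace.go, hnp]]
        rw [ih hfree' f (c :: acc) (by simp at h ⊢; omega)]
        simp

theorem dec_enc (run : List Char) (hfree : ¬ sentL <:+: run) :
    PySem.Chars.replace (run.flatMap encC) sentL [' '] = run := by
  rw [show PySem.Chars.replace (run.flatMap encC) sentL [' ']
        = PySem.Chars.replace.go sentL [' '] (run.flatMap encC).length (run.flatMap encC) [] by
      simp [PySem.Chars.replace, sentL]]
  simpa using dec_enc_go run hfree (run.flatMap encC).length [] le_rfl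

-- every token of tokP is an infix of buf ++ cs
theorem tokP_infix (p : Char → Bool) :
    ∀ (cs buf u : List Char), u ∈ tokP p cs buf → u <:+: (buf ++ cs) := by
  intro cs
  induction cs with
  | nil =>
    intro buf u hu
    by_cases hb : buf = [] <;> simp [tokP, hb] at hu
    simp [hu]
  | cons c t ih =>
    intro buf u hu
    by_cases hp : p c
    · by_cases hb : buf = []
      · simp [tokP, hp, hb] at hu
        exact ((ih [] u hu).trans (List.suffix_cons c t).isInfix).trans (List.suffix_append buf (c :: t)).isInfix
      · simp [tokP, hp, hb] at hu
        rcases hu with hu | hu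
        · exact hu ▸ (List.prefix_append buf (c :: t)).isInfix
        · exact ((ih [] u hu).trans (List.suffix_cons c t).isInfix).trans (List.suffix_append buf (c :: t)).isInfix
    · simp only [tokP, if_neg hp] at hu
      have := ih (buf ++ [c]) u hu
      simpa using this

-- main invariant: A's whitespace split of the encoded stream computes tokP, encoded
theorem split_go_enc :
    ∀ (cs buf : List Char) (acc : List (List Char)),
      PySem.Chars.split₀.go (cs.flatMap gC) ((buf.flatMap encC).reverse) acc
        = acc.reverse ++ (tokP sepB cs buf).map (·.flatMap encC) := by
  intro cs
  induction cs with
  | nil =>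
    intro buf acc
    by_cases hb : buf = []
    · simp [hb, PySem.Chars.split₀.go, tokP]
    · have hne : ¬ buf.flatMap encC = [] := fun h => hb ((enc_eq_nil_iff buf).mp h)
      simp [PySem.Chars.split₀.go, tokP, hb, List.isEmpty_iff, hne]
  | cons c t ih =>
    intro buf acc
    by_cases hc3 : c = ';'
    · -- ';' becomes the separator ' '
      subst hc3
      rw [show ((';' : Char) :: t).flatMap gC = ' ' :: t.flatMap gC by simp [gC]]
      by_cases hb : buf = []
      · rw [show PySem.Chars.split₀.go (' ' :: t.flatMap gC) ((buf.flatMap encC).reverse) acc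
              = PySem.Chars.split₀.go (t.flatMap gC) [] acc by
            simp [PySem.Chars.split₀.go, show PySem.Chars.isspace ' ' = true from by decide, hb]]
        rw [show ([] : List Char) = (([] : List Char).flatMap encC).reverse by simp, ih [] acc]
        simp [tokP, show sepB ';' = true from by decide, hb]
      · have hne : ¬ buf.flatMap encC = [] := fun h => hb ((enc_eq_nil_iff buf).mp h)
        rw [show PySem.Chars.split₀.go (' ' :: t.flatMap gC) ((buf.flatMap encC).reverse) acc
              = PySem.Chars.split₀.go (t.flatMap gC) [] (buf.flatMap encC :: acc) by
            simp [PySem.Chars.split₀.go, show PySem.Chars.isspace ' ' = true from by decide,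
              List.isEmpty_iff, hne]]
        rw [show ([] : List Char) = (([] : List Char).flatMap encC).reverse by simp,
          ih [] (buf.flatMap encC :: acc)]
        simp [tokP, show sepB ';' = true from by decide, hb]
    · by_cases hsp : PySem.Chars.isspace c = true
      · by_cases hsc : c = ' '
        · -- a space inside a token: four non-space sentinel characters
          subst hsc
          rw [show (' ' :: t).flatMap gC = '<' :: '!' :: '?' :: '>' :: t.flatMap gC by simp [gC, sentL]]
          rw [show PySem.Chars.split₀.go ('<' :: '!' :: '?' :: '>' :: t.flatMap gC) ((buf.flatMap encC).reverse) acc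
                = PySem.Chars.split₀.go (t.flatMap gC) ('>' :: '?' :: '!' :: '<' :: (buf.flatMap encC).reverse) acc by
              simp [PySem.Chars.split₀.go,
                show PySem.Chars.isspace '<' = false from by decide,
                show PySem.Chars.isspace '!' = false from by decide,
                show PySem.Chars.isspace '?' = false from by decide,
                show PySem.Chars.isspace '>' = false from by decide]]
          rw [show ('>' :: '?' :: '!' :: '<' :: (buf.flatMap encC).reverse)
                = ((buf ++ [' ']).flatMap encC).reverse by simp [encC, sentL]]
          rw [ih (buf ++ [' ']) acc]
          simp [tokP, show sepB ' ' = false from by decide]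
        · -- a genuine whitespace separator (tab, newline, ...)
          have hsep : sepB c = true := by simp [sepB, hsp]; exact Or.inr hsc
          have hgc : gC c = [c] := by simp [gC, hsc, hc3]
          rw [show (c :: t).flatMap gC = c :: t.flatMap gC by simp [hgc]]
          by_cases hb : buf = []
          · rw [show PySem.Chars.split₀.go (c :: t.flatMap gC) ((buf.flatMap encC).reverse) acc
                  = PySem.Chars.split₀.go (t.flatMap gC) [] acc by
                simp [PySem.Chars.split₀.go, hsp, hb]]
            rw [show ([] : List Char) = (([] : List Char).flatMap encC).reverse by simp, ih [] acc]
            simp [tokP, hsep, hb]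
          · have hne : ¬ buf.flatMap encC = [] := fun h => hb ((enc_eq_nil_iff buf).mp h)
            rw [show PySem.Chars.split₀.go (c :: t.flatMap gC) ((buf.flatMap encC).reverse) acc
                  = PySem.Chars.split₀.go (t.flatMap gC) [] (buf.flatMap encC :: acc) by
                simp [PySem.Chars.split₀.go, hsp, List.isEmpty_iff, hne]]
            rw [show ([] : List Char) = (([] : List Char).flatMap encC).reverse by simp,
              ih [] (buf.flatMap encC :: acc)]
            simp [tokP, hsep, hb]
      · -- ordinary character: kept in the current token
        have hsc : ¬ c = ' ' := fun h => by rw [h] at hsp; exact hsp (by decide)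
        have hsep : sepB c = false := by simp [sepB, hsp, hc3]
        have hgc : gC c = [c] := by simp [gC, hsc, hc3]
        rw [show (c :: t).flatMap gC = c :: t.flatMap gC by simp [hgc]]
        rw [show PySem.Chars.split₀.go (c :: t.flatMap gC) ((buf.flatMap encC).reverse) acc
              = PySem.Chars.split₀.go (t.flatMap gC) (c :: (buf.flatMap encC).reverse) acc by
            simp [PySem.Chars.split₀.go, hsp]]
        rw [show (c :: (buf.flatMap encC).reverse) = ((buf ++ [c]).flatMap encC).reverse by
          simp [encC, hsc]]
        rw [ih (buf ++ [c]) acc]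
        simp [tokP, hsep]

-- B's fold computes tokP
theorem alt_foldl :
    ∀ (cs : List Char) (res : List String) (buf : List Char),
      flushPart (cs.foldl stepB (res, buf)) = res ++ (tokP sepB cs buf).map String.ofList := by
  intro cs
  induction cs with
  | nil => intro res buf; by_cases hb : buf = [] <;> simp [flushPart, tokP, hb]
  | cons c t ih =>
    intro res buf
    by_cases hp : sepB c
    · rw [List.foldl_cons, show stepB (res, buf) c = (flushPart (res, buf), []) from if_pos hp,
        ih (flushPart (res, buf)) []]
      by_cases hb : buf = [] <;> simp [flushPart, tokP, hp, hb, List.append_assoc]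
    · simp only [List.foldl_cons, stepB, if_neg hp]
      simpa [tokP, hp] using ih res (buf ++ [c])

-- ===== VERDICT (by name: the statement is the Claim_ definition above) =====
theorem servParse_spec : Claim_unchanged_servParse := by
  intro instr _ hD
  have hfree : ¬ sentL <:+: instr.toList := by
    intro hinf
    exact hD ((PySem.Str.isIn_iff_infix "<!?>" instr).mpr hinf)
  -- B's side
  have hB : servParse_alt instr = (tokP sepB instr.toList []).map String.ofList := by
    show flushPart (instr.toList.foldl stepB ([], [])) = _
    simpa using alt_foldl instr.toList [] []
  -- A's side: the tokens of the encoded split are the encodings of tokP's tokens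
  have htokL : (PySem.Str.split₀ (PySem.Str.replace (PySem.Str.replace instr " " "<!?>") ";" " ")).map String.toList
      = (tokP sepB instr.toList []).map (·.flatMap encC) := by
    rw [PySem.Str.split₀_map_toList]
    rw [show (PySem.Str.replace (PySem.Str.replace instr " " "<!?>") ";" " ").toList
          = instr.toList.flatMap gC by
        rw [PySem.Str.toList_replace, PySem.Str.toList_replace]
        exact pipeline_eq instr.toList]
    have := split_go_enc instr.toList [] []
    simpa [PySem.Chars.split₀] using this
  show servParse instr = servParse_alt instr
  unfold servParse
  rw [PySem.List.foldl_append_singleton_eq_map, List.nil_append, hB]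
  have hstep : ∀ tok : String, PySem.Str.replace tok "<!?>" " "
      = String.ofList (PySem.Chars.replace tok.toList sentL [' ']) := by
    intro tok
    rw [show PySem.Chars.replace tok.toList sentL [' ']
          = (PySem.Str.replace tok "<!?>" " ").toList from (PySem.Str.toList_replace tok "<!?>" " ").symm]
    exact String.ofList_toList.symm
  calc (PySem.Str.split₀ (PySem.Str.replace (PySem.Str.replace instr " " "<!?>") ";" " ")).map
          (fun tok => PySem.Str.replace tok "<!?>" " ")
      = ((PySem.Str.split₀ (PySem.Str.replace (PySem.Str.replace instr " " "<!?>") ";" " ")).map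
          String.toList).map (fun l => String.ofList (PySem.Chars.replace l sentL [' '])) := by
        rw [List.map_map]; exact List.map_congr_left (fun tok _ => by simp [hstep tok])
    _ = ((tokP sepB instr.toList []).map (·.flatMap encC)).map
          (fun l => String.ofList (PySem.Chars.replace l sentL [' '])) := by rw [htokL]
    _ = (tokP sepB instr.toList []).map String.ofList := by
        rw [List.map_map]
        refine List.map_congr_left (fun u hu => ?_)
        have hufree : ¬ sentL <:+: u := fun hi =>
          hfree (hi.trans (by simpa using tokP_infix sepB instr.toList [] u hu))
        simp [dec_enc u hufree]

theorem servParse_changed : Claim_changed_servParse := by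
  unfold Claim_changed_servParse; decide
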